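/-
  SEGMENT C9 OF `start_decoder` (0x114724–0x114782 + the two error stubs 0x114b7f–0x114ba8; stb_vorbis_fixed.c 3871–3876) SPLIT AT THE
  RETURNS OF ITS CALLS: the assertions at the new cut points, the claims of the four children, and the composition `SegC9.of_parts`
  (pure logic: `ReachVia.trans`; no machine step).

      C9a  0x114724–0x114727, returns into 0x11472c (`cut118`)    `compute_accelerated_huffman(c)`                      exit: AtC9a
      C9b  0x11472c–0x114736, returns into 0x11473b (`cut119`)    `get_bits(f, 4)`                                      exit: AtC9b
      C9c  0x11473b–0x114782 + 0x114b7f–0x114b8c + 0x114b96–0x114ba3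
                                                                  `c->lookup_type = …` (checked byte store), `> 2` rejected, FIX 3
                                                                  (two checked loads, the 64-bit product), the dispatch; the two
                                                                  error stubs up to the return of `error`
                                                                  exits: AtC10 (type 0), AtC11 (type 1, 2), AtC9d (after `error`)
      C9d  0x114b91 (`cut147`) / 0x114ba8 (`cut148`): `jmp 113b22`                                                     exit: AtERR

  WHAT IS LIVE ACROSS A CALL (c/vorbis_f_insns.txt 0x114724 … 0x114782): r14 = c (every access of the struct), `[rsp + 0x18]` = f
  (0x114731, and the stubs), `[rsp + 0x30]` = i (segment C10). At 0x11473b: eax (the four bits; `mov ebx, eax`). rbx, rbp, r12, r13, r15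
  are dead at the entry (`InC9`) and written before they are read. At 0x114b91 / 0x114ba8: eax = 0 (`error`'s result, the return
  value of start_decoder).

  The children carry `Frame` + `Cur` + the point's clauses with the lemmas of Vorbis/Spec/StartDecoderCarry.lean (`MInv.step` over
  compute_accelerated_huffman's / get_bits' / error's footprint, `BookFields` for K1 – K4c over the change of fast_huffman).
-/
import Vorbis.Spec.StartDecoderA
namespace Vorbis.Spec.StartDecoder
open X86 X86.User Asan

/-- **Cut 0x11472c (`cut118`): the return of `compute_accelerated_huffman(c)`** (line 3871 done): `InC9` with K5 — CUR(i) ∧ K1 – K5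
(the tables allocated since `Ai`) ∧ temps = [] ∧ c fresh at {LT, LV, MU}. Nothing about rax … r15 but r14 = c (`Cur.r14`). -/
structure InC9a (u₀ : State) (g : Ghost) (i : Nat) (A2 A3 Ai : Arena) (A : Arena × List Obj) (v : State) : Prop where
  /-- the common part, at the return address of the call at 0x114727 -/
  frame : Frame u₀ g L.start_decoder.cut118 A v
  /-- CUR(i): r14 = c, `[R + 18H]` = f, `[R + 30H]` = i -/
  cur : Cur g i A2 A3 Ai A v
  /-- K1 – K4c as at `AtC9` (the callee writes fast_huffman only), K5 from its post -/
  k : K15 (Since Ai A.1) v.mem (g.cb v.mem i)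
  /-- no temp block outstanding -/
  noTemps : A.1.temps = []
  /-- lookup_type, lookup_values, multiplicands still hold the 0 of ZF -/
  fresh : Fresh3 v.mem (g.cb v.mem i)

/-- `AtC9a i`: `InC9a` for some ghost arena and snapshots. -/
def AtC9a (u₀ : State) (g : Ghost) (i : Nat) (v : State) : Prop := ∃ A A2 A3 Ai, InC9a u₀ g i A2 A3 Ai A v

/-- **Cut 0x11473b (`cut119`): the return of `get_bits(f, 4)`** (line 3874, before `mov ebx, eax`): `InC9a` at the new address, and
rax = the four bits: `< 16` (`GetBitsPost.result` with `n = 4`). -/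
structure InC9b (u₀ : State) (g : Ghost) (i : Nat) (A2 A3 Ai : Arena) (A : Arena × List Obj) (v : State) : Prop where
  /-- the common part, at the return address of the call at 0x114736 -/
  frame : Frame u₀ g L.start_decoder.cut119 A v
  /-- CUR(i) -/
  cur : Cur g i A2 A3 Ai A v
  /-- K1 – K5 (get_bits writes reader fields of `*f` only) -/
  k : K15 (Since Ai A.1) v.mem (g.cb v.mem i)
  /-- no temp block outstanding -/
  noTemps : A.1.temps = []
  /-- lookup_type, lookup_values, multiplicands still 0 -/
  fresh : Fresh3 v.mem (g.cb v.mem i)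
  /-- the value read: four bits, in the whole of rax -/
  rax : (v.reg .rax).toNat < 16

/-- `AtC9b i`: `InC9b` for some ghost arena and snapshots. -/
def AtC9b (u₀ : State) (g : Ghost) (i : Nat) (v : State) : Prop := ∃ A A2 A3 Ai, InC9b u₀ g i A2 A3 Ai A v

/-- **Cuts 0x114b91 (`cut147`) / 0x114ba8 (`cut148`): the return of `error(f, VORBIS_invalid_setup)`** in one of the two stubs of
line 3875 (before `jmp 113b22`): `BodyERR` at the stub's address — FR, the hand-over carrier, eax = 0 ∧ SD.ERR (`Cur.failed` after
`error`'s store of `f->error`). -/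
structure InC9d (u₀ : State) (g : Ghost) (A : Arena × List Obj) (v : State) : Prop where
  /-- the common part, at the return address of the call at 0x114b8c or at 0x114ba3 -/
  frame : Frame u₀ g L.start_decoder.cut147 A v ∨ Frame u₀ g L.start_decoder.cut148 A v
  /-- the hand-over carrier (`BodyERR.hand`) -/
  hand : g.Hand A
  /-- `error` returned 0 -/
  rax : v.reg .rax = 0
  /-- SD.ERR -/
  failed : Failed g.len g.f (g.Live A) A v.mem

/-- `AtC9d`: `InC9d` for some ghost arena. -/
def AtC9d (u₀ : State) (g : Ghost) (v : State) : Prop := ∃ A, InC9d u₀ g A v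

/-- **Segment `start_decoder.C9a`** (0x114724–0x114727 and the callee: `compute_accelerated_huffman(c)` gives K5). -/
def SegC9a (Lay : Layout) (μ : Microarch) (u₀ : State) : Prop :=
  ∀ (g : Ghost) (i : Nat) (v : State), AtC9 u₀ g i v → ReachVia Lay μ WayInv v (fun w => AtC9a u₀ g i w)

/-- **Segment `start_decoder.C9b`** (0x11472c–0x114736 and the callee: `get_bits(f, 4)`). -/
def SegC9b (Lay : Layout) (μ : Microarch) (u₀ : State) : Prop :=
  ∀ (g : Ghost) (i : Nat) (v : State), AtC9a u₀ g i v → ReachVia Lay μ WayInv v (fun w => AtC9b u₀ g i w)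

/-- **Segment `start_decoder.C9c`** (0x11473b–0x114782 and the stubs up to the return of `error`: the store of lookup_type, `> 2`
rejected, FIX 3, the dispatch on lookup_type). -/
def SegC9c (Lay : Layout) (μ : Microarch) (u₀ : State) : Prop :=
  ∀ (g : Ghost) (i : Nat) (v : State), AtC9b u₀ g i v →
    ReachVia Lay μ WayInv v (fun w => AtC10 u₀ g i w ∨ AtC11 u₀ g i w ∨ AtC9d u₀ g w)

/-- **Segment `start_decoder.C9d`** (0x114b91 / 0x114ba8: `jmp 113b22`, the epilogue with eax = 0). -/
def SegC9d (Lay : Layout) (μ : Microarch) (u₀ : State) : Prop :=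
  ∀ (g : Ghost) (v : State), AtC9d u₀ g v → ReachVia Lay μ WayInv v (fun w => AtERR u₀ g w)

/-- **The composition of segment C9 from its four parts**: C9a reaches `AtC9a`; C9b reaches `AtC9b`; C9c leaves to C10 / C11 or
reaches `AtC9d`; C9d reaches `AtERR`. Pure logic (`ReachVia.trans`). -/
theorem SegC9.of_parts {Lay : Layout} {μ : Microarch} {u₀ : State}
    (ha : SegC9a Lay μ u₀) (hb : SegC9b Lay μ u₀) (hc : SegC9c Lay μ u₀) (hd : SegC9d Lay μ u₀) : SegC9 Lay μ u₀ := by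
  intro g i v hat
  refine (ha g i v hat).trans ?_
  intro va hva
  refine (hb g i va hva).trans ?_
  intro vb hvb
  refine (hc g i vb hvb).trans ?_
  intro vc hvc
  rcases hvc with h10 | h11 | h9d
  · exact ReachVia.done (Or.inl h10)
  · exact ReachVia.done (Or.inr (Or.inl h11))
  · refine (hd g vc h9d).trans ?_
    intro vd herr
    exact ReachVia.done (Or.inr (Or.inr herr))

end Vorbis.Spec.StartDecoder
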